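-- pv_equiv track=rewrite | github.com/kalebwondimu33/LeetcodeSolutions | LeetcodeSolution/leetcode/circular-array-loop.py | circularArrayLoop
-- ===== SOURCE A (Python) =====
-- from typing import List
--
-- def circularArrayLoop(nums: List[int]) -> bool:
--     n,visted=len(nums),set()
--     for i in range(n):
--         if i not in visted:
--             circle=set()
--             while True:
--                 if i in circle:
--                     return True
--                 if i in visted:
--                     break
--                 visted.add(i)
--                 circle.add(i)
--                 prev,i=i,(i+nums[i])%n
--                 if prev==i or (nums[prev]>0) != (nums[i]>0):
--                     break
--
--
--
--     return False
-- ===== SOURCE B (Python) =====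
-- from typing import List
--
-- def circularArrayLoop(nums: List[int]) -> bool:
--     # For each start, walk the jump function up to n steps looking for a
--     # return to the start along a single-direction, non-self-loop path.
--     n = len(nums)
--     for i in range(n):
--         j = i
--         for _ in range(n):
--             k = (j + nums[j]) % n
--             if k == j or (nums[j] > 0) != (nums[k] > 0):
--                 break
--             j = k
--             if j == i:
--                 return True
--     return False
-- ===== Notes on version B (the rewrite author's own statement) =====
-- stated objective: simpler
-- what changed: Replaced the DFS with global visited- and per-run cycle-sets by a plain per-start bounded walk (at most n steps of next=(j+nums[j])%n) that reports a loop exactly when the walk returns to its start; no sets are maintained.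
import Mathlib
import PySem

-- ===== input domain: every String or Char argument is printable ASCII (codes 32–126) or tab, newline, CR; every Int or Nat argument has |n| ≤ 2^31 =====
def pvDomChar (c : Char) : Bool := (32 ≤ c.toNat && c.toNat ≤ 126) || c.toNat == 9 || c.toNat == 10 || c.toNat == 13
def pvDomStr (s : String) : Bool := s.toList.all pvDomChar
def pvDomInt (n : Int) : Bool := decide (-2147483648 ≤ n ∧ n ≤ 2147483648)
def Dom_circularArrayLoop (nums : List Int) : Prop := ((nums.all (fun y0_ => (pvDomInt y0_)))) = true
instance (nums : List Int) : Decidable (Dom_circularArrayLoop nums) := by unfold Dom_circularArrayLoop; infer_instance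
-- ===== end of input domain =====

-- B replaces A's DFS with visited/cycle sets by a per-start bounded walk checking return-to-start;
-- this file proves the two return the same Bool on every input (simpler decomposition, not faster).

-- ===== PORT A =====
-- inner 'while True' loop of A; fuel = len(nums)+1 bounds the iterations (each full
-- iteration adds a fresh index to 'circle' ⊆ range(n), so the fuel is never exhausted —
-- proved below); it returns (found, visited)
def pvAInner (nums : List Int) (n : Int) : Nat → Int → PySem.Set Int → PySem.Set Int → Bool × PySem.Set Int
  | 0, _, visited, _ => (false, visited)
  | fuel+1, i, visited, circle =>
    if PySem.Set.contains circle i then (true, visited)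
    else if PySem.Set.contains visited i then (false, visited)
    else if i == PySem.Int.mod (i + PySem.List.pyGetD nums i 0) n
          || (decide (PySem.List.pyGetD nums i 0 > 0)
              != decide (PySem.List.pyGetD nums (PySem.Int.mod (i + PySem.List.pyGetD nums i 0) n) 0 > 0))
    then (false, PySem.Set.add visited i)
    else pvAInner nums n fuel (PySem.Int.mod (i + PySem.List.pyGetD nums i 0) n)
           (PySem.Set.add visited i) (PySem.Set.add circle i)

def circularArrayLoop (nums : List Int) : Bool :=
  ((PySem.List.pyRange 0 (nums.length : Int) 1).foldl
    (fun acc i =>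
      if acc.1 then acc
      else if PySem.Set.contains acc.2 i then acc
      else pvAInner nums (nums.length : Int) (nums.length + 1) i acc.2 PySem.Set.empty)
    (false, PySem.Set.empty)).1

-- ===== PORT B =====
-- inner 'for _ in range(n)' walk of B, from current position j looking for start i
def pvBWalk (nums : List Int) (n : Int) (i : Int) : Nat → Int → Bool
  | 0, _ => false
  | m+1, j =>
    if PySem.Int.mod (j + PySem.List.pyGetD nums j 0) n == j
        || (decide (PySem.List.pyGetD nums j 0 > 0)
            != decide (PySem.List.pyGetD nums (PySem.Int.mod (j + PySem.List.pyGetD nums j 0) n) 0 > 0))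
    then false
    else if PySem.Int.mod (j + PySem.List.pyGetD nums j 0) n == i then true
    else pvBWalk nums n i m (PySem.Int.mod (j + PySem.List.pyGetD nums j 0) n)

def circularArrayLoop_alt (nums : List Int) : Bool :=
  (PySem.List.pyRange 0 (nums.length : Int) 1).any
    (fun i => pvBWalk nums (nums.length : Int) i nums.length i)

-- ===== PRECONDITION & SPEC =====
def Spec_circularArrayLoop (nums : List Int) (out : Bool) : Prop := out = circularArrayLoop_alt nums
instance (nums : List Int) (out : Bool) : Decidable (Spec_circularArrayLoop nums out) := by unfold Spec_circularArrayLoop; infer_instance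

-- ===== CLAIM (what is proved, stated in full; the proofs are below) =====
def Claim_equal_circularArrayLoop : Prop := ∀ (nums : List Int), Dom_circularArrayLoop nums → Spec_circularArrayLoop nums (circularArrayLoop nums)

-- ===== LEMMAS AND PROOFS =====

-- the jump function next = (j + nums[j]) % n, and validity of the edge out of j
def pvG (nums : List Int) (j : Int) : Int :=
  PySem.Int.mod (j + PySem.List.pyGetD nums j 0) (nums.length : Int)

def pvOkP (nums : List Int) (j : Int) : Prop :=
  pvG nums j ≠ j ∧
    ((PySem.List.pyGetD nums j 0 > 0) ↔ (PySem.List.pyGetD nums (pvG nums j) 0 > 0))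

def pvInR (nums : List Int) (i : Int) : Prop := 0 ≤ i ∧ i < (nums.length : Int)

-- i lies on a cycle of valid edges
def pvOnCyc (nums : List Int) (i : Int) : Prop :=
  ∃ m : Nat, 1 ≤ m ∧ (∀ t < m, pvOkP nums ((pvG nums)^[t] i)) ∧ (pvG nums)^[m] i = i

def pvHasCyc (nums : List Int) : Prop := ∃ i, pvInR nums i ∧ pvOnCyc nums i

theorem pvG_def (nums : List Int) (j : Int) :
    PySem.Int.mod (j + PySem.List.pyGetD nums j 0) (nums.length : Int) = pvG nums j := rfl

-- the break condition of both loops is the negation of pvOkP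
theorem pvCond_false_iff (nums : List Int) (i : Int) :
    ((i == pvG nums i)
      || (decide (PySem.List.pyGetD nums i 0 > 0)
          != decide (PySem.List.pyGetD nums (pvG nums i) 0 > 0))) = false ↔ pvOkP nums i := by
  constructor
  · intro h
    simp only [Bool.or_eq_false_iff, beq_eq_false_iff_ne, bne_eq_false_iff_eq,
      decide_eq_decide] at h
    exact ⟨Ne.symm h.1, h.2⟩
  · intro h
    simp only [Bool.or_eq_false_iff, beq_eq_false_iff_ne, bne_eq_false_iff_eq,
      decide_eq_decide]
    exact ⟨Ne.symm h.1, h.2⟩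

theorem pvCond_false_iff' (nums : List Int) (i : Int) :
    ((pvG nums i == i)
      || (decide (PySem.List.pyGetD nums i 0 > 0)
          != decide (PySem.List.pyGetD nums (pvG nums i) 0 > 0))) = false ↔ pvOkP nums i := by
  simp only [Bool.or_eq_false_iff, beq_eq_false_iff_ne, bne_eq_false_iff_eq, decide_eq_decide]
  exact Iff.rfl

theorem pvInR_pvG (nums : List Int) (i : Int) (h : pvInR nums i) : pvInR nums (pvG nums i) := by
  
  obtain ⟨h0, h1⟩ := h
  have hn : (0:Int) < (nums.length:Int) := lt_of_le_of_lt h0 h1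
  exact ⟨PySem.Int.mod_nonneg _ hn, PySem.Int.mod_lt _ hn⟩

theorem pvInR_iterate (nums : List Int) (i : Int) (h : pvInR nums i) (t : Nat) :
    pvInR nums ((pvG nums)^[t] i) := by
  
  induction t with
  | zero => exact h
  | succ t ih => rw [Function.iterate_succ_apply']; exact pvInR_pvG nums _ ih

theorem pvOnCyc_ok (nums : List Int) (i : Int) (h : pvOnCyc nums i) : pvOkP nums i := by
  
  obtain ⟨m, hm, hok, _⟩ := h
  simpa using hok 0 hm

theorem pvOnCyc_step (nums : List Int) (i : Int) (h : pvOnCyc nums i) : pvOnCyc nums (pvG nums i) := by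
  
  obtain ⟨m, hm1, hok, hcyc⟩ := h
  refine ⟨m, hm1, ?_, ?_⟩
  · intro t ht
    have h1 : (pvG nums)^[t] (pvG nums i) = (pvG nums)^[t+1] i :=
      (Function.iterate_succ_apply _ _ _).symm
    rw [h1]
    rcases Nat.lt_or_ge (t+1) m with h' | h'
    · exact hok (t+1) h'
    · have hEq : t + 1 = m := by omega
      rw [hEq, hcyc]
      simpa using hok 0 hm1
  · have h1 : (pvG nums)^[m] (pvG nums i) = (pvG nums)^[m+1] i :=
      (Function.iterate_succ_apply _ _ _).symm
    rw [h1, Function.iterate_succ_apply', hcyc]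

-- a revisit along a valid path yields a cycle at the revisited node
theorem pvCyc_of_revisit (nums : List Int) (a : Int) (m t0 : Nat)
    (hok : ∀ t < m, pvOkP nums ((pvG nums)^[t] a)) (ht0 : t0 < m)
    (hrev : (pvG nums)^[m] a = (pvG nums)^[t0] a) : pvOnCyc nums ((pvG nums)^[t0] a) := by
  
  refine ⟨m - t0, by omega, ?_, ?_⟩
  · intro t ht
    rw [← Function.iterate_add_apply]
    exact hok (t + t0) (by omega)
  · rw [← Function.iterate_add_apply]
    have hEq : m - t0 + t0 = m := by omega
    rw [hEq, hrev]

-- a nodup list of in-range indices has length ≤ n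
theorem pvLen_le (nums : List Int) (l : List Int) (hnd : l.Nodup)
    (hR : ∀ x ∈ l, pvInR nums x) : l.length ≤ nums.length := by
  
  classical
  have hmap : (l.map Int.toNat).Nodup := by
    refine List.Nodup.map_on ?_ hnd
    intro x hx y hy hxy
    obtain ⟨hx0, _⟩ := hR x hx
    obtain ⟨hy0, _⟩ := hR y hy
    omega
  have hsub : (l.map Int.toNat).toFinset ⊆ Finset.range nums.length := by
    intro y hy
    simp only [List.mem_toFinset, List.mem_map] at hy
    obtain ⟨x, hx, rfl⟩ := hy
    obtain ⟨hx0, hx1⟩ := hR x hx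
    simp only [Finset.mem_range]
    omega
  calc l.length = (l.map Int.toNat).length := by simp
    _ = (l.map Int.toNat).toFinset.card := (List.toFinset_card_of_nodup hmap).symm
    _ ≤ (Finset.range nums.length).card := Finset.card_le_card hsub
    _ = nums.length := Finset.card_range _

-- any cycle admits a cycle of length ≤ n (pigeonhole)
theorem pvOnCyc_bounded (nums : List Int) (i : Int) (hR : pvInR nums i) (h : pvOnCyc nums i) :
    ∃ m : Nat, 1 ≤ m ∧ m ≤ nums.length ∧
      (∀ t < m, pvOkP nums ((pvG nums)^[t] i)) ∧ (pvG nums)^[m] i = i := by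
  
  obtain ⟨m, hm1, hok, hcyc⟩ := h
  induction m using Nat.strong_induction_on with
  | _ m ih =>
  by_cases hle : m ≤ nums.length
  · exact ⟨m, hm1, hle, hok, hcyc⟩
  · replace hle : nums.length < m := by omega
    have hR' : ∀ t : Nat, pvInR nums ((pvG nums)^[t] i) := pvInR_iterate nums i hR
    have hcard : Fintype.card (Fin nums.length) < Fintype.card (Fin m) := by
      simpa using hle
    obtain ⟨s, t, hst, heq⟩ := Fintype.exists_ne_map_eq_of_card_lt
      (fun (u : Fin m) => (⟨((pvG nums)^[u.1] i).toNat, by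
        obtain ⟨h0, h1⟩ := hR' u.1; omega⟩ : Fin nums.length)) hcard
    have hval : ((pvG nums)^[s.1] i) = ((pvG nums)^[t.1] i) := by
      have hv := congrArg Fin.val heq
      simp only at hv
      obtain ⟨hs0, _⟩ := hR' s.1
      obtain ⟨ht0, _⟩ := hR' t.1
      omega
    have key : ∀ s' t' : Nat, s' < t' → t' < m → (pvG nums)^[s'] i = (pvG nums)^[t'] i →
        ∃ m' : Nat, 1 ≤ m' ∧ m' ≤ nums.length ∧
          (∀ u < m', pvOkP nums ((pvG nums)^[u] i)) ∧ (pvG nums)^[m'] i = i := by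
      intro s' t' hlt htm hseq
      refine ih (m - (t' - s')) (by omega) (by omega) ?_ ?_
      · intro u hu; exact hok u (by omega)
      · have h1 : m - (t' - s') = (m - t') + s' := by omega
        rw [h1, Function.iterate_add_apply, hseq, ← Function.iterate_add_apply]
        have h2 : (m - t') + t' = m := by omega
        rw [h2, hcyc]
    have hne : s.1 ≠ t.1 := fun hh => hst (Fin.ext hh)
    rcases Nat.lt_or_ge s.1 t.1 with hlt | hge
    · exact key s.1 t.1 hlt t.isLt hval
    · exact key t.1 s.1 (by omega) s.isLt hval.symm

-- ---- A side ----

theorem pvAInner_mono (nums : List Int) :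
    ∀ (fuel : Nat) (i : Int) (visited circle : PySem.Set Int) (x : Int),
      x ∈ visited → x ∈ (pvAInner nums (nums.length : Int) fuel i visited circle).2 := by
  
  intro fuel
  induction fuel with
  | zero => intro i visited circle x hx; exact hx
  | succ fuel ih =>
    intro i visited circle x hx
    simp only [pvAInner]
    split_ifs with h1 h2 h3
    · exact hx
    · exact hx
    · exact (PySem.Set.mem_add _ _ _).mpr (Or.inl hx)
    · exact ih _ _ _ x ((PySem.Set.mem_add _ _ _).mpr (Or.inl hx))

-- soundness: if the inner loop reports True along a valid path, a cycle exists
theorem pvAInner_sound (nums : List Int) :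
    ∀ (fuel : Nat) (m : Nat) (i : Int) (visited circle : PySem.Set Int) (a : Int),
      pvInR nums a →
      (∀ t < m, pvOkP nums ((pvG nums)^[t] a)) →
      (pvG nums)^[m] a = i →
      (∀ x ∈ circle, ∃ t < m, (pvG nums)^[t] a = x) →
      (pvAInner nums (nums.length : Int) fuel i visited circle).1 = true →
      pvHasCyc nums := by
  
  intro fuel
  induction fuel with
  | zero =>
    intro m i visited circle a _ _ _ _ htrue
    simp [pvAInner] at htrue
  | succ fuel ih =>
    intro m i visited circle a hRa hok hend hcirc htrue
    simp only [pvAInner, pvG_def] at htrue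
    split_ifs at htrue with h1 h2 h3
    · -- revisit found
      obtain ⟨t0, ht0, heq⟩ := hcirc i ((PySem.Set.contains_iff _ _).mp h1)
      refine ⟨i, ?_, ?_⟩
      · rw [← hend]; exact pvInR_iterate nums a hRa m
      · rw [← heq]
        exact pvCyc_of_revisit nums a m t0 hok ht0 (by rw [hend, heq])
    · refine ih (m+1) (pvG nums i) (PySem.Set.add visited i) (PySem.Set.add circle i) a hRa
        ?_ ?_ ?_ htrue
      · intro t ht
        rcases Nat.lt_or_ge t m with h' | h'
        · exact hok t h'
        · have hEq : t = m := by omega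
          subst hEq
          rw [hend]
          exact (pvCond_false_iff nums i).mp (by simpa using h3)
      · rw [Function.iterate_succ_apply', hend]
      · intro x hx
        rcases (PySem.Set.mem_add _ _ _).mp hx with hx' | hx'
        · obtain ⟨t, ht, heq⟩ := hcirc x hx'
          exact ⟨t, by omega, heq⟩
        · exact ⟨m, by omega, by rw [hend, hx']⟩

-- completeness + preservation: with enough fuel the inner loop finds any cycle through i,
-- and if it returns False it has added no cycle node to visited
theorem pvAInner_main (nums : List Int) :
    ∀ (fuel : Nat) (i : Int) (visited circle : PySem.Set Int),
      pvInR nums i →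
      (∀ x ∈ circle, pvInR nums x) →
      circle.Nodup →
      nums.length + 1 ≤ fuel + circle.length →
      (∀ x ∈ visited, pvInR nums x → pvOnCyc nums x → x ∈ circle) →
      (pvOnCyc nums i → (pvAInner nums (nums.length : Int) fuel i visited circle).1 = true) ∧
      (∀ x ∈ (pvAInner nums (nums.length : Int) fuel i visited circle).2,
        x ∈ visited ∨ ((pvAInner nums (nums.length : Int) fuel i visited circle).1 = false →
          ¬ pvOnCyc nums x)) := by
  
  intro fuel
  induction fuel with
  | zero =>
    intro i visited circle _ h2 h3 h4 _
    have := pvLen_le nums circle h3 h2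
    omega
  | succ fuel ih =>
    intro i visited circle h1R h2 h3 h4 h5
    simp only [pvAInner, pvG_def]
    split_ifs with hc1 hc2 hc3
    · exact ⟨fun _ => rfl, fun x hx => Or.inl hx⟩
    · constructor
      · intro hOn
        exact absurd ((PySem.Set.contains_iff _ _).mpr (h5 i ((PySem.Set.contains_iff _ _).mp hc2) h1R hOn)) hc1
      · exact fun x hx => Or.inl hx
    · constructor
      · intro hOn
        have := (pvCond_false_iff nums i).mpr (pvOnCyc_ok nums i hOn)
        simp [this] at hc3
      · intro x hx
        rcases (PySem.Set.mem_add _ _ _).mp hx with hx' | hx'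
        · exact Or.inl hx'
        · refine Or.inr (fun _ hOn => ?_)
          rw [hx'] at hOn
          have := (pvCond_false_iff nums i).mpr (pvOnCyc_ok nums i hOn)
          simp [this] at hc3
    · have hcF : i ∉ circle := fun hm => hc1 ((PySem.Set.contains_iff _ _).mpr hm)
      have hlen : (PySem.Set.add circle i).length = circle.length + 1 := by
        rw [PySem.Set.add_of_not_mem hcF]; simp
      obtain ⟨IH1, IH2⟩ := ih (pvG nums i) (PySem.Set.add visited i) (PySem.Set.add circle i)
        (pvInR_pvG nums i h1R)
        (fun x hx => by
          rcases (PySem.Set.mem_add _ _ _).mp hx with hx' | hx'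
          · exact h2 x hx'
          · rw [hx']; exact h1R)
        (PySem.Set.nodup_add _ _ h3)
        (by omega)
        (fun x hx hxR hxOn => by
          rcases (PySem.Set.mem_add _ _ _).mp hx with hx' | hx'
          · exact (PySem.Set.mem_add _ _ _).mpr (Or.inl (h5 x hx' hxR hxOn))
          · exact (PySem.Set.mem_add _ _ _).mpr (Or.inr hx'))
      constructor
      · intro hOn
        exact IH1 (pvOnCyc_step nums i hOn)
      · intro x hx
        rcases IH2 x hx with hx' | hx'
        · rcases (PySem.Set.mem_add _ _ _).mp hx' with hv | hv
          · exact Or.inl hv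
          · refine Or.inr (fun hf hOn => ?_)
            rw [hv] at hOn
            rw [IH1 (pvOnCyc_step nums i hOn)] at hf
            exact Bool.noConfusion hf
        · exact Or.inr hx'

-- the outer fold function of A's port
def pvF (nums : List Int) : Bool × PySem.Set Int → Int → Bool × PySem.Set Int := fun acc i =>
  if acc.1 then acc
  else if PySem.Set.contains acc.2 i then acc
  else pvAInner nums (nums.length : Int) (nums.length + 1) i acc.2 PySem.Set.empty

theorem pvA_eq (nums : List Int) :
    circularArrayLoop nums
      = ((PySem.List.pyRange 0 (nums.length : Int) 1).foldl (pvF nums) (false, PySem.Set.empty)).1 := rfl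

theorem pvFold_true (nums : List Int) :
    ∀ (l : List Int) (acc : Bool × PySem.Set Int), acc.1 = true →
      l.foldl (pvF nums) acc = acc := by
  
  intro l
  induction l with
  | nil => intro acc _; rfl
  | cons a l ih =>
    intro acc hacc
    rw [List.foldl_cons]
    have hstep : pvF nums acc a = acc := by simp [pvF, hacc]
    rw [hstep]
    exact ih acc hacc

theorem pvFold_sound (nums : List Int) :
    ∀ (l : List Int) (acc : Bool × PySem.Set Int),
      (∀ x ∈ l, pvInR nums x) →
      (acc.1 = true → pvHasCyc nums) →
      (l.foldl (pvF nums) acc).1 = true → pvHasCyc nums := by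
  
  intro l
  induction l with
  | nil =>
    intro acc _ hacc htrue
    exact hacc htrue
  | cons a l ih =>
    intro acc hl hacc htrue
    rw [List.foldl_cons] at htrue
    refine ih (pvF nums acc a) (fun x hx => hl x (List.mem_cons_of_mem a hx)) ?_ htrue
    intro hstep
    by_cases ha : acc.1 = true
    · exact hacc ha
    · by_cases hmem : a ∈ acc.2
      · simp [pvF, ha, hmem] at hstep
      · have hstep' : (pvAInner nums (nums.length : Int) (nums.length + 1) a acc.2
            PySem.Set.empty).1 = true := by
          simpa [pvF, ha, hmem] using hstep
        refine pvAInner_sound nums (nums.length + 1) 0 a acc.2 PySem.Set.empty a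
          (hl a List.mem_cons_self) (by omega) rfl ?_ hstep'
        intro x hx
        simp [PySem.Set.empty] at hx

theorem pvFold_complete (nums : List Int) :
    ∀ (l : List Int) (acc : Bool × PySem.Set Int),
      (∀ x ∈ l, pvInR nums x) →
      (acc.1 = false → ∀ x ∈ acc.2, pvInR nums x → ¬ pvOnCyc nums x) →
      (l.foldl (pvF nums) acc).1 = false →
      (∀ x ∈ (l.foldl (pvF nums) acc).2, pvInR nums x → ¬ pvOnCyc nums x) ∧
      (∀ x, x ∈ acc.2 ∨ x ∈ l → x ∈ (l.foldl (pvF nums) acc).2) := by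
  
  intro l
  induction l with
  | nil =>
    intro acc hl hacc hfalse
    refine ⟨hacc hfalse, ?_⟩
    intro x hx
    rcases hx with hx | hx
    · exact hx
    · simp at hx
  | cons a l ih =>
    intro acc hl hacc hfalse
    rw [List.foldl_cons] at hfalse ⊢
    have hRa : pvInR nums a := hl a List.mem_cons_self
    by_cases ha : acc.1 = true
    · exfalso
      have heq := pvFold_true nums l (pvF nums acc a) (by simp [pvF, ha])
      rw [heq] at hfalse
      simp [pvF, ha] at hfalse
    · replace ha : acc.1 = false := by simpa using ha
      have hv := hacc ha
      by_cases hmem : a ∈ acc.2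
      · have hstep : pvF nums acc a = acc := by simp [pvF, ha, hmem]
        rw [hstep] at hfalse ⊢
        obtain ⟨P1, P2⟩ := ih acc (fun x hx => hl x (List.mem_cons_of_mem a hx)) hacc hfalse
        refine ⟨P1, ?_⟩
        intro x hx
        rcases hx with hx | hx
        · exact P2 x (Or.inl hx)
        · rcases List.mem_cons.mp hx with hx' | hx'
          · rw [hx']; exact P2 a (Or.inl hmem)
          · exact P2 x (Or.inr hx')
      · have hstep : pvF nums acc a
            = pvAInner nums (nums.length : Int) (nums.length + 1) a acc.2 PySem.Set.empty := by
          simp [pvF, ha, hmem]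
        rw [hstep] at hfalse ⊢
        obtain ⟨M1, M2⟩ := pvAInner_main nums (nums.length + 1) a acc.2 PySem.Set.empty hRa
          (by intro x hx; simp [PySem.Set.empty] at hx)
          (by simp [PySem.Set.empty])
          (by simp [PySem.Set.empty])
          (by intro x hx hxR hxOn; exact absurd hxOn (hv x hx hxR))
        set acc' := pvAInner nums (nums.length : Int) (nums.length + 1) a acc.2 PySem.Set.empty
          with hacc'
        have hacc'v : acc'.1 = false → ∀ x ∈ acc'.2, pvInR nums x → ¬ pvOnCyc nums x := by
          intro hf x hx hxR hxOn
          rcases M2 x hx with hx' | hx'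
          · exact hv x hx' hxR hxOn
          · exact hx' hf hxOn
        obtain ⟨P1, P2⟩ := ih acc' (fun x hx => hl x (List.mem_cons_of_mem a hx)) hacc'v hfalse
        refine ⟨P1, ?_⟩
        intro x hx
        have hsub : ∀ y ∈ acc.2, y ∈ acc'.2 := by
          intro y hy
          exact pvAInner_mono nums (nums.length + 1) a acc.2 PySem.Set.empty y hy
        rcases hx with hx | hx
        · exact P2 x (Or.inl (hsub x hx))
        · rcases List.mem_cons.mp hx with hx' | hx'
          · subst hx'
            refine P2 x (Or.inl ?_)
            show x ∈ acc'.2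
            rw [hacc']
            simp only [pvAInner, pvG_def]
            split_ifs with hc1 hc2 hc3
            · exact absurd ((PySem.Set.contains_iff _ _).mp hc1) (by simp [PySem.Set.empty])
            · exact absurd ((PySem.Set.contains_iff _ _).mp hc2) hmem
            · exact (PySem.Set.mem_add _ _ _).mpr (Or.inr rfl)
            · exact pvAInner_mono nums _ _ _ _ x ((PySem.Set.mem_add _ _ _).mpr (Or.inr rfl))
          · exact P2 x (Or.inr hx')

theorem pvA_iff (nums : List Int) : circularArrayLoop nums = true ↔ pvHasCyc nums := by
  
  constructor
  · intro htrue
    rw [pvA_eq] at htrue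
    refine pvFold_sound nums (PySem.List.pyRange 0 (nums.length : Int) 1) (false, PySem.Set.empty)
      ?_ ?_ htrue
    · intro x hx
      have := PySem.List.mem_pyRange_one.mp hx
      exact ⟨this.1, this.2⟩
    · intro h; simp at h
  · intro ⟨c, hcR, hcC⟩
    by_contra hfalse
    replace hfalse : circularArrayLoop nums = false := by simpa using hfalse
    rw [pvA_eq] at hfalse
    obtain ⟨P1, P2⟩ := pvFold_complete nums (PySem.List.pyRange 0 (nums.length : Int) 1)
      (false, PySem.Set.empty)
      (by intro x hx
          have := PySem.List.mem_pyRange_one.mp hx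
          exact ⟨this.1, this.2⟩)
      (by intro _ x hx; simp [PySem.Set.empty] at hx)
      hfalse
    have hcmem : c ∈ PySem.List.pyRange 0 (nums.length : Int) 1 :=
      PySem.List.mem_pyRange_one.mpr ⟨hcR.1, hcR.2⟩
    exact P1 c (P2 c (Or.inr hcmem)) hcR hcC

-- ---- B side ----

theorem pvBWalk_iff (nums : List Int) (i : Int) :
    ∀ (m : Nat) (j : Int),
      pvBWalk nums (nums.length : Int) i m j = true ↔
        ∃ s : Nat, 1 ≤ s ∧ s ≤ m ∧ (∀ t < s, pvOkP nums ((pvG nums)^[t] j)) ∧ (pvG nums)^[s] j = i := by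
  
  intro m
  induction m with
  | zero =>
    intro j
    simp only [pvBWalk]
    constructor
    · intro h; simp at h
    · intro ⟨s, h1, h2, _⟩; omega
  | succ m ih =>
    intro j
    simp only [pvBWalk, pvG_def]
    by_cases hok : pvOkP nums j
    · rw [if_neg (by simp [(pvCond_false_iff' nums j).mpr hok])]
      by_cases hhit : pvG nums j = i
      · rw [if_pos (by simpa using hhit)]
        simp only [true_iff]
        exact ⟨1, le_refl 1, by omega, by intro t ht; interval_cases t; simpa using hok,
          by simpa using hhit⟩
      · rw [if_neg (by simpa using hhit)]
        rw [ih (pvG nums j)]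
        constructor
        · intro ⟨s, h1, h2, hokp, hend⟩
          refine ⟨s+1, by omega, by omega, ?_, ?_⟩
          · intro t ht
            cases t with
            | zero => simpa using hok
            | succ t' =>
              rw [Function.iterate_succ_apply]
              exact hokp t' (by omega)
          · rw [Function.iterate_succ_apply]
            exact hend
        · intro ⟨s, h1, h2, hokp, hend⟩
          have hs2 : 2 ≤ s := by
            rcases Nat.lt_or_ge s 2 with h' | h'
            · exfalso
              have hs1 : s = 1 := by omega
              subst hs1
              simp only [Function.iterate_one] at hend
              exact hhit hend
            · exact h'
          refine ⟨s-1, by omega, by omega, ?_, ?_⟩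
          · intro t ht
            have h1' : (pvG nums)^[t] (pvG nums j) = (pvG nums)^[t+1] j :=
              (Function.iterate_succ_apply _ _ _).symm
            rw [h1']
            exact hokp (t+1) (by omega)
          · have h1' : (pvG nums)^[s-1] (pvG nums j) = (pvG nums)^[s-1+1] j :=
              (Function.iterate_succ_apply _ _ _).symm
            rw [h1']
            have h2' : s - 1 + 1 = s := by omega
            rw [h2']
            exact hend
    · rw [if_pos ?_]
      · constructor
        · intro h; simp at h
        · intro ⟨s, h1, h2, hokp, _⟩
          exact absurd (by simpa using hokp 0 (by omega)) hok
      · by_contra hcond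
        replace hcond : ((pvG nums j == j)
            || (decide (PySem.List.pyGetD nums j 0 > 0)
                != decide (PySem.List.pyGetD nums (pvG nums j) 0 > 0))) = false := by
          simpa using hcond
        exact hok ((pvCond_false_iff' nums j).mp hcond)

theorem pvB_iff (nums : List Int) : circularArrayLoop_alt nums = true ↔ pvHasCyc nums := by
  
  simp only [circularArrayLoop_alt, List.any_eq_true]
  constructor
  · intro ⟨i, hmem, hw⟩
    have hR := PySem.List.mem_pyRange_one.mp hmem
    obtain ⟨s, h1, _, hokp, hend⟩ := (pvBWalk_iff nums i nums.length i).mp hw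
    exact ⟨i, ⟨hR.1, hR.2⟩, s, h1, hokp, hend⟩
  · intro ⟨i, hR, hC⟩
    obtain ⟨m, h1, h2, hokp, hend⟩ := pvOnCyc_bounded nums i hR hC
    refine ⟨i, PySem.List.mem_pyRange_one.mpr ⟨hR.1, hR.2⟩, ?_⟩
    exact (pvBWalk_iff nums i nums.length i).mpr ⟨m, h1, h2, hokp, hend⟩

-- ===== VERDICT (by name: the statement is the Claim_ definition above) =====
theorem circularArrayLoop_spec : Claim_equal_circularArrayLoop := by
  intro nums _
  unfold Spec_circularArrayLoop
  have hA := pvA_iff nums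
  have hB := pvB_iff nums
  cases hA' : circularArrayLoop nums <;> cases hB' : circularArrayLoop_alt nums <;> simp_all
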